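-- pv_equiv track=rewrite | github.com/zairaygl/itmgt-25.03 | 213234_Ad Hoc Analysis_Code.py | check_engaged
-- ===== SOURCE A (Python) =====
-- def check_engaged(list): # 'list' refers to the truths_list of each customer
--     engaged_truths = []
--     for i in range(len(list)): # Goes over each month
--         if (all(list[i] > 0 for i in range(0, i+1))): # If there is a transaction from the previous months up to current month
--             engaged_truths.append(1)
--         else:
--             engaged_truths.append(0)
--     return engaged_truths
-- ===== SOURCE B (Python) =====
-- def check_engaged(list):
--     engaged_truths = []
--     ok = True
--     for x in list:
--         ok = ok and x > 0
--         engaged_truths.append(1 if ok else 0)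
--     return engaged_truths
-- ===== Notes on version B (the rewrite author's own statement) =====
-- stated objective: faster
-- what changed: Replaces the per-month re-scan of the whole prefix (all(...) over range(i+1) inside the loop) by a single pass that carries a running all-positive flag.
import Mathlib
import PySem

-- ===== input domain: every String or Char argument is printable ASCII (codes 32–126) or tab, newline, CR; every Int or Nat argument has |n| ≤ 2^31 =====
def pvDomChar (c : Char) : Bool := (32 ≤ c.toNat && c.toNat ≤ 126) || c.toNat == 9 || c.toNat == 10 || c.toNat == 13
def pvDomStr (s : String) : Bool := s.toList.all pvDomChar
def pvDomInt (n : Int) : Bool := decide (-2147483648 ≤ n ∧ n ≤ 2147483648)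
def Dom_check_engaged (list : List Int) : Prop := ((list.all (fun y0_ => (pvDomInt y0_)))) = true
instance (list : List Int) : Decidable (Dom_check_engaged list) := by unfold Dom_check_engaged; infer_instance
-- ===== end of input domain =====

-- B replaces A's quadratic per-index prefix re-scan by one pass carrying a running all-positive flag (faster: asymptotic).


-- ===== PORT A =====
-- for i in range(len(list)): append 1 if all(list[j] > 0 for j in range(0, i+1)) else 0
-- (indices are always in range, so list[j] is ported as getD j 0)
def check_engaged (list : List Int) : List Int :=
  (List.range list.length).foldl
    (fun engaged_truths i =>
      if (List.range (i + 1)).all (fun j => decide (list.getD j 0 > 0)) then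
        engaged_truths ++ [1]
      else
        engaged_truths ++ [0])
    []

-- ===== PORT B =====
-- single pass: ok = ok and x > 0; append 1 if ok else 0
def check_engaged_alt (list : List Int) : List Int :=
  (list.foldl
    (fun (st : List Int × Bool) x =>
      let ok := st.2 && decide (x > 0)
      (st.1 ++ [if ok then 1 else 0], ok))
    ([], true)).1

-- ===== PRECONDITION & SPEC =====
def Spec_check_engaged (list : List Int) (out : List Int) : Prop := out = check_engaged_alt list
instance (list : List Int) (out : List Int) : Decidable (Spec_check_engaged list out) := by unfold Spec_check_engaged; infer_instance

-- ===== CLAIM (what is proved, stated in full; the proofs are below) =====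
def Claim_equal_check_engaged : Prop := ∀ (list : List Int), Dom_check_engaged list → Spec_check_engaged list (check_engaged list)

-- ===== LEMMAS AND PROOFS =====

-- recursive form of B's loop body
def pvGB : Bool → List Int → List Int
  | _, [] => []
  | ok, x :: xs =>
    let ok' := ok && decide (x > 0)
    (if ok' then (1 : Int) else 0) :: pvGB ok' xs

theorem pvB_foldl (xs : List Int) : ∀ (acc : List Int) (ok : Bool),
    (xs.foldl
      (fun (st : List Int × Bool) x =>
        let ok := st.2 && decide (x > 0)
        (st.1 ++ [if ok then 1 else 0], ok))
      (acc, ok)).1 = acc ++ pvGB ok xs := by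
  induction xs with
  | nil => intro acc ok; simp [pvGB]
  | cons x xs ih =>
    intro acc ok
    simp only [List.foldl_cons, pvGB]
    rw [ih]
    simp

theorem pvA_foldl (xs : List Nat) (f : Nat → Int) : ∀ (acc : List Int),
    (xs.foldl (fun acc i => if (List.range (i + 1)).all (fun j => decide (f j > 0)) then acc ++ [1] else acc ++ [0]) acc)
      = acc ++ xs.map (fun i => if (List.range (i + 1)).all (fun j => decide (f j > 0)) then (1 : Int) else 0) := by
  induction xs with
  | nil => intro acc; simp
  | cons x xs ih =>
    intro acc
    simp only [List.foldl_cons, List.map_cons]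
    rw [ih]
    by_cases h : (List.range (x + 1)).all (fun j => decide (f j > 0)) = true <;> simp [h]

theorem pvGB_false (xs : List Int) : pvGB false xs = xs.map (fun _ => 0) := by
  induction xs with
  | nil => rfl
  | cons x xs ih => simp [pvGB, ih]

theorem pvMain (l : List Int) :
    (List.range l.length).map
        (fun i => if (List.range (i + 1)).all (fun j => decide (l.getD j 0 > 0)) then (1 : Int) else 0)
      = pvGB true l := by
  induction l with
  | nil => rfl
  | cons x xs ih =>
    rw [List.length_cons, List.range_succ_eq_map, List.map_cons, List.map_map]
    have hcomp : ((fun i => if (List.range (i + 1)).all (fun j => decide ((x :: xs).getD j 0 > 0)) then (1 : Int) else 0) ∘ Nat.succ)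
        = (fun i => if (List.range (i + 1 + 1)).all (fun j => decide ((x :: xs).getD j 0 > 0)) then (1 : Int) else 0) := by
      funext i; rfl
    rw [hcomp]
    have head : (List.range (0 + 1)).all (fun j => decide ((x :: xs).getD j 0 > 0)) = decide (x > 0) := by
      simp [List.range_succ]
    by_cases hx : x > 0
    · have htail : ∀ i : Nat,
          ((List.range (i + 1 + 1)).all (fun j => decide ((x :: xs).getD j 0 > 0)))
            = ((List.range (i + 1)).all (fun j => decide (xs.getD j 0 > 0))) := by
        intro i
        rw [List.range_succ_eq_map, List.all_cons, List.all_map]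
        simp only [Function.comp_def, List.getD_cons_succ, List.getD_cons_zero]
        simp [hx]
      have hmap : (List.range xs.length).map
          (fun i => if (List.range (i + 1 + 1)).all (fun j => decide ((x :: xs).getD j 0 > 0)) then (1 : Int) else 0)
          = (List.range xs.length).map
          (fun i => if (List.range (i + 1)).all (fun j => decide (xs.getD j 0 > 0)) then (1 : Int) else 0) := by
        apply List.map_congr_left; intro i _; rw [htail]
      rw [hmap, ih, head]
      simp [pvGB, hx]
    · have htail : ∀ i : Nat,
          ((List.range (i + 1 + 1)).all (fun j => decide ((x :: xs).getD j 0 > 0))) = false := by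
        intro i
        rw [List.range_succ_eq_map, List.all_cons, List.all_map]
        simp [hx]
      have hmap : (List.range xs.length).map
          (fun i => if (List.range (i + 1 + 1)).all (fun j => decide ((x :: xs).getD j 0 > 0)) then (1 : Int) else 0)
          = (List.range xs.length).map (fun _ => (0 : Int)) := by
        apply List.map_congr_left; intro i _; rw [htail]; simp
      rw [hmap, head, pvGB]
      simp [hx, pvGB_false, List.map_const']

-- ===== VERDICT (by name: the statement is the Claim_ definition above) =====
theorem check_engaged_spec : Claim_equal_check_engaged := by
  intro l _
  unfold Spec_check_engaged check_engaged check_engaged_alt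
  rw [pvB_foldl, pvA_foldl, pvMain]
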